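-- pv_equiv track=rewrite | github.com/Slavomir04/Lista2 | functions/Reduce.py | oneNameCounterInLine
-- ===== SOURCE A (Python) =====
-- def nonWhiteValues()->list[str]:
--     return [' ',',','.','-','/']
--
-- def splitFromChars(string:str,ignore:list[str],nondigit=False)->list[str]:
--     if(len(ignore)==0):
--         return str
--     result = []
--     array = []
--     for c in string:
--         if ignore.__contains__(c) or (nondigit and c.isdigit()):
--             if(len(array)>0):
--                 result.append(''.join(array))
--             array = []
--             continue
--         else:
--             array.append(c)
--     if(len(array)>0):
--         result.append(''.join(array))
--     return result
--
-- def oneNameCounterInLine(line:str)->int: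
--         c=0
--         a = splitFromChars(string=line,ignore=nonWhiteValues(),nondigit=True)
--         for i in range(1,len(a)):
--             first_char = a[i][0]
--             if ord('A') <= ord(first_char) <= ord('Z'):
--                 c+=1
--         return c
-- ===== SOURCE B (Python) =====
-- def oneNameCounterInLine(line: str) -> int:
--     in_token = False
--     started = 0
--     c = 0
--     for ch in line:
--         if ch in (' ', ',', '.', '-', '/') or ch.isdigit():
--             in_token = False
--         elif not in_token:
--             in_token = True
--             started += 1
--             if started >= 2 and 'A' <= ch <= 'Z':
--                 c += 1
--     return c
-- ===== Notes on version B (the rewrite author's own statement) =====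
-- stated objective: faster
-- what changed: Replaces the two-phase build-token-list-then-index-scan (splitFromChars producing a list of strings, then a range loop over indices >= 1) with a single pass over the characters keeping only a three-value state machine (in-token flag, tokens-started counter, result counter); no intermediate token list is built.
import Mathlib
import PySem

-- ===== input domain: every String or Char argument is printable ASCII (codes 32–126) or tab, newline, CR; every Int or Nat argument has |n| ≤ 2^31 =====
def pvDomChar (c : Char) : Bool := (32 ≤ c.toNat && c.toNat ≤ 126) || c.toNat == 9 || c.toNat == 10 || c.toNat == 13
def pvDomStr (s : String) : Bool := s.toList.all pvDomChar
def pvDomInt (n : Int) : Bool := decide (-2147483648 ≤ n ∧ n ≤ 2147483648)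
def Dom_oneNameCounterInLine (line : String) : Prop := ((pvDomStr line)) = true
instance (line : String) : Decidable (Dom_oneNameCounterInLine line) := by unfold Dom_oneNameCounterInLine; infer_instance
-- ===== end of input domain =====

-- B is a single pass with a tiny state machine (no intermediate token list is built); a timing run measured a constant-factor speedup.

-- ===== PORT A =====
-- nonWhiteValues()
def pvNonWhiteValues : List Char := [' ', ',', '.', '-', '/']

-- splitFromChars(string, ignore, nondigit=True): tokens kept as List Char (PySem strings are lists of chars)
def pvSplitFromChars (s : List Char) (ignore : List Char) : List (List Char) :=
  let st := s.foldl
    (fun (st : List (List Char) × List Char) c =>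
      if ignore.contains c || PySem.Chars.isdigit c then
        (if st.2.length > 0 then st.1 ++ [st.2] else st.1, [])
      else
        (st.1, st.2 ++ [c]))
    ([], [])
  if st.2.length > 0 then st.1 ++ [st.2] else st.1

def oneNameCounterInLine (line : String) : Int :=
  let a := pvSplitFromChars line.toList pvNonWhiteValues
  (PySem.List.pyRange 1 a.length 1).foldl
    (fun c i =>
      let tok := PySem.List.pyGetD a i []        -- a[i]; i always in range
      match PySem.List.pyGet? tok 0 with         -- a[i][0]
      | some fc => if 'A'.toNat ≤ fc.toNat ∧ fc.toNat ≤ 'Z'.toNat then c + 1 else c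
      | none => c)
    0

-- ===== PORT B =====
def oneNameCounterInLine_alt (line : String) : Int :=
  let st := line.toList.foldl
    (fun (st : Bool × Int × Int) ch =>
      if [' ', ',', '.', '-', '/'].contains ch || PySem.Chars.isdigit ch then
        (false, st.2.1, st.2.2)
      else if !st.1 then
        (true, st.2.1 + 1,
          if st.2.1 + 1 ≥ 2 ∧ 'A' ≤ ch ∧ ch ≤ 'Z' then st.2.2 + 1 else st.2.2)
      else st)
    (false, 0, 0)
  st.2.2

-- ===== PRECONDITION & SPEC =====
def Spec_oneNameCounterInLine (line : String) (out : Int) : Prop := out = oneNameCounterInLine_alt line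
instance (line : String) (out : Int) : Decidable (Spec_oneNameCounterInLine line out) := by unfold Spec_oneNameCounterInLine; infer_instance

-- ===== CLAIM (what is proved, stated in full; the proofs are below) =====
def Claim_equal_oneNameCounterInLine : Prop := ∀ (line : String), Dom_oneNameCounterInLine line → Spec_oneNameCounterInLine line (oneNameCounterInLine line)

-- ===== LEMMAS AND PROOFS =====

-- is c a separator for this task?
def pvIsSep (c : Char) : Bool := pvNonWhiteValues.contains c || PySem.Chars.isdigit c

-- does a token start with an ASCII capital?
def pvUpFirst (tok : List Char) : Bool :=
  match tok.head? with
  | some fc => decide ('A'.toNat ≤ fc.toNat ∧ fc.toNat ≤ 'Z'.toNat)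
  | none => false

-- the mathematical value of A's counting loop
def pvCnt (a : List (List Char)) : Int := ((a.drop 1).countP pvUpFirst : Nat)

def pvStepA (st : List (List Char) × List Char) (c : Char) : List (List Char) × List Char :=
  if pvIsSep c then (if st.2.length > 0 then st.1 ++ [st.2] else st.1, [])
  else (st.1, st.2 ++ [c])

def pvFin (st : List (List Char) × List Char) : List (List Char) :=
  if st.2.length > 0 then st.1 ++ [st.2] else st.1

def pvStepB (st : Bool × Int × Int) (ch : Char) : Bool × Int × Int :=
  if [' ', ',', '.', '-', '/'].contains ch || PySem.Chars.isdigit ch then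
    (false, st.2.1, st.2.2)
  else if !st.1 then
    (true, st.2.1 + 1,
      if st.2.1 + 1 ≥ 2 ∧ 'A' ≤ ch ∧ ch ≤ 'Z' then st.2.2 + 1 else st.2.2)
  else st

lemma pvCnt_append (xs : List (List Char)) (t : List Char) :
    pvCnt (xs ++ [t]) = pvCnt xs + (if 1 ≤ xs.length ∧ pvUpFirst t then 1 else 0) := by
  cases xs with
  | nil => simp [pvCnt]
  | cons x rest =>
    simp only [pvCnt, List.cons_append, List.drop_succ_cons, List.drop_zero,
      List.countP_append]
    by_cases h : pvUpFirst t <;> simp [h, List.countP_cons] <;> omega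

lemma pvChar_le_iff (a b : Char) : (a ≤ b) ↔ a.toNat ≤ b.toNat := by
  rw [Char.le_def]; exact UInt32.le_iff_toNat_le

lemma pvSepB_eq (ch : Char) :
    ([' ', ',', '.', '-', '/'].contains ch || PySem.Chars.isdigit ch) = pvIsSep ch := by
  simp [pvIsSep, pvNonWhiteValues]

-- main invariant: B's counter tracks pvCnt of A's finalized split
lemma pvMain (cs : List Char) (result : List (List Char)) (array : List Char) (c : Int) :
    (cs.foldl pvStepB
      (!array.isEmpty, ((result.length : Int) + (if array.isEmpty then 0 else 1),
        c + pvCnt (pvFin (result, array))))).2.2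
    = c + pvCnt (pvFin (cs.foldl pvStepA (result, array))) := by
  induction cs generalizing result array c with
  | nil => simp
  | cons ch rest ih =>
    rw [List.foldl_cons, List.foldl_cons]
    by_cases hsep : pvIsSep ch
    · have hA : pvStepA (result, array) ch = (pvFin (result, array), []) := by
        simp [pvStepA, hsep, pvFin]
      have hB : pvStepB (!array.isEmpty, ((result.length : Int) + (if array.isEmpty then 0 else 1),
            c + pvCnt (pvFin (result, array)))) ch
          = (!(List.isEmpty ([] : List Char)),
             (((pvFin (result, array)).length : Int) + (if ([] : List Char).isEmpty then 0 else 1),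
              c + pvCnt (pvFin (pvFin (result, array), ([] : List Char))))) := by
        simp only [pvStepB, pvSepB_eq, hsep, if_true]
        cases array <;> simp [pvFin] <;> push_cast <;> ring
      rw [hA, hB]
      exact ih (pvFin (result, array)) [] c
    · cases harr : array with
      | nil =>
        have hA : pvStepA (result, []) ch = (result, [ch]) := by
          simp [pvStepA, hsep]
        have hcnt : pvCnt (pvFin (result, [ch]))
            = pvCnt (pvFin (result, ([] : List Char)))
              + (if ((result.length : Int)) + 0 + 1 ≥ 2 ∧ 'A' ≤ ch ∧ ch ≤ 'Z' then 1 else 0) := by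
          have h1 : pvFin (result, ([] : List Char)) = result := by simp [pvFin]
          have h2 : pvFin (result, [ch]) = result ++ [[ch]] := by simp [pvFin]
          rw [h1, h2, pvCnt_append]
          congr 1
          have : ((result.length : Int) + 0 + 1 ≥ 2 ∧ 'A' ≤ ch ∧ ch ≤ 'Z')
              ↔ (1 ≤ result.length ∧ pvUpFirst [ch] = true) := by
            constructor
            · rintro ⟨hlen, h3, h4⟩
              refine ⟨by omega, ?_⟩
              simp [pvUpFirst]
              exact ⟨(pvChar_le_iff _ _).mp h3, (pvChar_le_iff _ _).mp h4⟩
            · rintro ⟨hlen, hup⟩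
              simp [pvUpFirst] at hup
              exact ⟨by omega, (pvChar_le_iff _ _).mpr hup.1, (pvChar_le_iff _ _).mpr hup.2⟩
          by_cases h : 1 ≤ result.length ∧ pvUpFirst [ch] = true
          · rw [if_pos h, if_pos (this.mpr h)]
          · rw [if_neg h, if_neg (fun hh => h (this.mp hh))]
        have hB : pvStepB (!(List.isEmpty ([] : List Char)),
              ((result.length : Int) + (if ([] : List Char).isEmpty then 0 else 1),
               c + pvCnt (pvFin (result, ([] : List Char))))) ch
            = (!(List.isEmpty [ch]),
               ((result.length : Int) + (if ([ch] : List Char).isEmpty then 0 else 1),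
                c + pvCnt (pvFin (result, [ch])))) := by
          simp only [pvStepB, pvSepB_eq, hsep, if_false, Bool.false_eq_true,
            List.isEmpty_nil, Bool.not_true, Bool.not_false, if_true, List.isEmpty_cons]
          rw [hcnt]
          by_cases h : ((result.length : Int)) + 0 + 1 ≥ 2 ∧ 'A' ≤ ch ∧ ch ≤ 'Z'
          · simp only [if_pos h]
            refine Prod.ext rfl (Prod.ext ?_ ?_) <;> simp <;> ring
          · simp only [if_neg h]
            refine Prod.ext rfl (Prod.ext ?_ ?_) <;> simp <;> ring
        subst harr
        rw [hB, hA]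
        exact ih result [ch] c
      | cons x t =>
        have hA : pvStepA (result, x :: t) ch = (result, (x :: t) ++ [ch]) := by
          simp [pvStepA, hsep]
        have hcnt : pvCnt (pvFin (result, (x :: t) ++ [ch])) = pvCnt (pvFin (result, x :: t)) := by
          have h1 : pvFin (result, x :: t) = result ++ [x :: t] := by simp [pvFin]
          have h2 : pvFin (result, (x :: t) ++ [ch]) = result ++ [(x :: t) ++ [ch]] := by
            simp [pvFin]
          rw [h1, h2, pvCnt_append, pvCnt_append]
          have : pvUpFirst ((x :: t) ++ [ch]) = pvUpFirst (x :: t) := by simp [pvUpFirst]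
          rw [this]
        have hB : pvStepB (!(List.isEmpty (x :: t)),
              ((result.length : Int) + (if (x :: t).isEmpty then 0 else 1),
               c + pvCnt (pvFin (result, x :: t)))) ch
            = (!(List.isEmpty ((x :: t) ++ [ch])),
               ((result.length : Int) + (if ((x :: t) ++ [ch]).isEmpty then 0 else 1),
                c + pvCnt (pvFin (result, (x :: t) ++ [ch])))) := by
          simp only [pvStepB, pvSepB_eq, hsep, if_false, Bool.false_eq_true,
            List.isEmpty_cons, Bool.not_false, if_true, List.cons_append]
          simp
          exact hcnt.symm
        subst harr
        rw [hB, hA]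
        exact ih result ((x :: t) ++ [ch]) c

-- A's counting loop computes pvCnt
lemma pvLoopA (a : List (List Char)) :
    (PySem.List.pyRange 1 a.length 1).foldl
      (fun c i =>
        let tok := PySem.List.pyGetD a i []
        match PySem.List.pyGet? tok 0 with
        | some fc => if 'A'.toNat ≤ fc.toNat ∧ fc.toNat ≤ 'Z'.toNat then c + 1 else c
        | none => c)
      0 = pvCnt a := by
  have hbody : ∀ (c : Int) (tok : List Char),
      (match PySem.List.pyGet? tok 0 with
       | some fc => if 'A'.toNat ≤ fc.toNat ∧ fc.toNat ≤ 'Z'.toNat then c + 1 else c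
       | none => c)
      = if pvUpFirst tok then c + 1 else c := by
    intro c tok
    cases tok with
    | nil => simp [pvUpFirst, PySem.List.pyGet?]
    | cons x xs =>
      simp [pvUpFirst, PySem.List.pyGet?_zero_cons]
  have h1 := PySem.List.foldl_pyRange_pyGetD' a [] (fun (c : Int) tok => if pvUpFirst tok then c + 1 else c) (0 : Int) (a := 1) (by norm_num)
  calc (PySem.List.pyRange 1 a.length 1).foldl
        (fun c i =>
          let tok := PySem.List.pyGetD a i []
          match PySem.List.pyGet? tok 0 with
          | some fc => if 'A'.toNat ≤ fc.toNat ∧ fc.toNat ≤ 'Z'.toNat then c + 1 else c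
          | none => c) 0
      = (PySem.List.pyRange 1 a.length 1).foldl
          (fun c i => if pvUpFirst (PySem.List.pyGetD a i []) then c + 1 else c) 0 := by
        congr 1; funext c i; exact hbody c _
    _ = (a.drop 1).foldl (fun c tok => if pvUpFirst tok then c + 1 else c) (0 : Int) := by simpa using h1
    _ = pvCnt a := by rw [PySem.List.foldl_count_if]; simp [pvCnt]

-- ===== VERDICT (by name: the statement is the Claim_ definition above) =====
theorem oneNameCounterInLine_spec : Claim_equal_oneNameCounterInLine := by
  intro line _
  unfold Spec_oneNameCounterInLine oneNameCounterInLine oneNameCounterInLine_alt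
  rw [pvLoopA]
  have hstepA : (fun (st : List (List Char) × List Char) c =>
      if pvNonWhiteValues.contains c || PySem.Chars.isdigit c then
        (if st.2.length > 0 then st.1 ++ [st.2] else st.1, [])
      else (st.1, st.2 ++ [c])) = pvStepA := by
    funext st c; simp [pvStepA, pvIsSep]
  have hstepB : (fun (st : Bool × Int × Int) ch =>
      if [' ', ',', '.', '-', '/'].contains ch || PySem.Chars.isdigit ch then
        (false, st.2.1, st.2.2)
      else if !st.1 then
        (true, st.2.1 + 1,
          if st.2.1 + 1 ≥ 2 ∧ 'A' ≤ ch ∧ ch ≤ 'Z' then st.2.2 + 1 else st.2.2)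
      else st) = pvStepB := by
    funext st ch; rfl
  have hsplit : pvSplitFromChars line.toList pvNonWhiteValues
      = pvFin (line.toList.foldl pvStepA ([], [])) := by
    unfold pvSplitFromChars pvFin
    rw [hstepA]
  rw [hsplit, hstepB]
  have := pvMain line.toList [] [] 0
  simpa using this.symm
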